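-- pv_equiv track=rewrite | github.com/tgalt/workflows | scripts/sa_match_transactions/match_hines4-recursive-backtracking.py | find_matching_transactions
-- ===== SOURCE A (Python) =====
-- def find_matching_transactions(groupA_values, groupB_values, used_a, used_b):
--     for combo_a_indices in groupA_values:
--         # Check and correct the type of combo_a_indices
--         if not isinstance(combo_a_indices, tuple):
--             combo_a_indices = (combo_a_indices,)
--
--         if any(idx in used_a for idx in combo_a_indices):
--             continue
--         sum_a = sum(groupA_values[idx] for idx in combo_a_indices)
--
--         for combo_b_indices in groupB_values:
--             # Check and correct the type of combo_b_indices
--             if not isinstance(combo_b_indices, tuple):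
--                 combo_b_indices = (combo_b_indices,)
--
--             if any(idx in used_b for idx in combo_b_indices):
--                 continue
--             sum_b = sum(groupB_values[idx] for idx in combo_b_indices)
--             if sum_a == sum_b:
--                 return combo_a_indices, combo_b_indices
--
--     return None, None
-- ===== SOURCE B (Python) =====
-- def find_matching_transactions(groupA_values, groupB_values, used_a, used_b):
--     # Build sum -> first free B key by overwriting while iterating B in reverse,
--     # then pick the first eligible A key with a single next() over A's items.
--     first_b = {}
--     for b in reversed(list(groupB_values)):
--         if b not in used_b:
--             first_b[groupB_values[b]] = b
--     hit = next(((a, first_b[v]) for a, v in groupA_values.items()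
--                 if a not in used_a and v in first_b), None)
--     if hit is None:
--         return None, None
--     return (hit[0],), (hit[1],)
-- ===== Notes on version B (the rewrite author's own statement) =====
-- stated objective: alternative
-- what changed: B replaces A's inner scan of groupB per candidate a with a dict (sum -> first unused B key) built by overwriting writes while iterating groupB in reverse, then a single next() pass over groupA with O(1) lookups; worst-case O(A*B) becomes O(A+B), though on random inputs A exits early and B was not measured faster.
import Mathlib
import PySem

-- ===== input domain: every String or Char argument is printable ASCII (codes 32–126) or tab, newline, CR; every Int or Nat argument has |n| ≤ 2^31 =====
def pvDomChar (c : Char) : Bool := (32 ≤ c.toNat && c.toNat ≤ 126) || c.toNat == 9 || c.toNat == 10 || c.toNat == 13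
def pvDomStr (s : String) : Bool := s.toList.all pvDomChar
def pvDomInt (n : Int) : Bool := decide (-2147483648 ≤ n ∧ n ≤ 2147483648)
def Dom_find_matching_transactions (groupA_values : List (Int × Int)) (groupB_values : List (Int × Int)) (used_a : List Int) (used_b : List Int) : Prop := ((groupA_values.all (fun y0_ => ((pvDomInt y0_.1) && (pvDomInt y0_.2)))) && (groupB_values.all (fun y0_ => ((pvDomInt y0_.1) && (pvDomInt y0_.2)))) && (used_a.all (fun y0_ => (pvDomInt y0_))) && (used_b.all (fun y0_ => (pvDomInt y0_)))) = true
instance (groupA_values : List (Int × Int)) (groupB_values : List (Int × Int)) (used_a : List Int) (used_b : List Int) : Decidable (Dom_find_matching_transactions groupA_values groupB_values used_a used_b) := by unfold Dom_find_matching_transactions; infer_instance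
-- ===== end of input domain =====

-- B builds a sum -> first-free-B-key map by a reverse fold with overwriting inserts and
-- then selects the first eligible A key with a single findSome? pass (alternative algorithm).


-- ===== PORT A =====
-- groupA_values / groupB_values are Python dicts int -> int (assoc lists viewed through
-- PySem.Dict.ofList), used_a / used_b are lists of ints. `for combo_b_indices in
-- groupB_values` iterates the KEYS b; keys are ints, so the isinstance branch always
-- wraps them into the 1-tuple (b,); `any(idx in used_b …)` is then `b in used_b`, and
-- `sum(groupB_values[idx] for idx in (b,))` is the value at b — the dict's keys are
-- unique, so iterating items (b, vb) gives exactly that value.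
-- A's inner loop over groupB's items: first b not in used_b whose value equals sum_a.
def pvInnerB (itemsB : List (Int × Int)) (used_b : List Int) (sum_a : Int) : Option Int :=
  match itemsB with
  | [] => none
  | (b, vb) :: rest =>
    if used_b.contains b then pvInnerB rest used_b sum_a
    else if sum_a = vb then some b
    else pvInnerB rest used_b sum_a

-- A's outer loop over groupA's items; a hit returns the two 1-tuples ((a,), (b,)).
def pvOuterA (itemsB : List (Int × Int)) (used_a used_b : List Int) : List (Int × Int) → Option (List Int) × Option (List Int)
  | [] => (none, none)
  | (a, va) :: rest =>
    if used_a.contains a then pvOuterA itemsB used_a used_b rest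
    else match pvInnerB itemsB used_b va with
      | some b => (some [a], some [b])
      | none => pvOuterA itemsB used_a used_b rest

def find_matching_transactions (groupA_values : List (Int × Int)) (groupB_values : List (Int × Int)) (used_a : List Int) (used_b : List Int) : Option (List Int) × Option (List Int) :=
  pvOuterA (PySem.Dict.ofList groupB_values).items used_a used_b (PySem.Dict.ofList groupA_values).items

-- ===== PORT B =====
-- B's first pass: iterate groupB's keys in reverse, plain overwriting writes, so the
-- FIRST free key for each sum is the one that survives.
def pvBuildIndex (groupB_values : List (Int × Int)) (used_b : List Int) : PySem.Dict Int Int :=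
  (PySem.Dict.ofList groupB_values).items.reverse.foldl
    (fun d p => if used_b.contains p.1 then d else d.insert p.2 p.1) PySem.Dict.empty

-- B's second step: next() over A's items = findSome? returning the matched pair.
def find_matching_transactions_alt (groupA_values : List (Int × Int)) (groupB_values : List (Int × Int)) (used_a : List Int) (used_b : List Int) : Option (List Int) × Option (List Int) :=
  let first_b := pvBuildIndex groupB_values used_b
  match (PySem.Dict.ofList groupA_values).items.findSome?
      (fun p => if used_a.contains p.1 then none
                else (first_b.get? p.2).map (fun b => (p.1, b))) with
  | some (a, b) => (some [a], some [b])
  | none => (none, none)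

-- ===== PRECONDITION & SPEC =====
def Spec_find_matching_transactions (groupA_values : List (Int × Int)) (groupB_values : List (Int × Int)) (used_a : List Int) (used_b : List Int) (out : Option (List Int) × Option (List Int)) : Prop := out = find_matching_transactions_alt groupA_values groupB_values used_a used_b
instance (groupA_values : List (Int × Int)) (groupB_values : List (Int × Int)) (used_a : List Int) (used_b : List Int) (out : Option (List Int) × Option (List Int)) : Decidable (Spec_find_matching_transactions groupA_values groupB_values used_a used_b out) := by unfold Spec_find_matching_transactions; infer_instance

-- ===== CLAIM =====
def Claim_equal_find_matching_transactions : Prop := ∀ (groupA_values : List (Int × Int)) (groupB_values : List (Int × Int)) (used_a : List Int) (used_b : List Int), Dom_find_matching_transactions groupA_values groupB_values used_a used_b → Spec_find_matching_transactions groupA_values groupB_values used_a used_b (find_matching_transactions groupA_values groupB_values used_a used_b)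

-- ===== LEMMAS AND PROOFS =====
-- The reverse fold's lookup for s is A's inner scan (earlier items are inserted later,
-- so the overwrite keeps the first free key for each sum), falling back to the seed.
theorem pvBuildIndex_get? (used_b : List Int) (l : List (Int × Int)) (d : PySem.Dict Int Int) (s : Int) :
    (l.reverse.foldl (fun d p => if used_b.contains p.1 then d else d.insert p.2 p.1) d).get? s
      = match pvInnerB l used_b s with
        | some b => some b
        | none => d.get? s := by
  induction l generalizing s with
  | nil => cases h : pvInnerB [] used_b s <;> simp [pvInnerB] at h ⊢
  | cons p rest ih =>
    obtain ⟨b, vb⟩ := p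
    rw [List.reverse_cons, List.foldl_append]
    simp only [List.foldl_cons, List.foldl_nil]
    by_cases hb : used_b.contains b
    · simp only [hb, if_true, pvInnerB, ih]
    · simp only [hb, Bool.false_eq_true, if_false, pvInnerB, PySem.Dict.get?_insert]
      by_cases hs : s = vb
      · rw [if_pos hs, if_pos hs]
      · rw [if_neg hs, if_neg hs, ih]

-- A's nested scan equals B's index-then-findSome?, item list by item list.
theorem pvOuterA_eq_findSome? (itemsB : List (Int × Int)) (used_a used_b : List Int)
    (itemsA : List (Int × Int)) :
    pvOuterA itemsB used_a used_b itemsA =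
      match itemsA.findSome?
          (fun p => if used_a.contains p.1 then none
                    else ((itemsB.reverse.foldl
                      (fun d p => if used_b.contains p.1 then d else d.insert p.2 p.1)
                      PySem.Dict.empty).get? p.2).map (fun b => (p.1, b))) with
      | some (a, b) => (some [a], some [b])
      | none => (none, none) := by
  induction itemsA with
  | nil => rfl
  | cons p rest ih =>
    obtain ⟨a, va⟩ := p
    rw [List.findSome?_cons]
    by_cases ha : used_a.contains a
    · simp only [pvOuterA, ha, if_true]
      exact ih
    · simp only [pvOuterA, ha, Bool.false_eq_true, if_false,
        pvBuildIndex_get? used_b itemsB PySem.Dict.empty va, PySem.Dict.get?_empty]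
      cases pvInnerB itemsB used_b va with
      | some b => rfl
      | none => simpa using ih

-- ===== VERDICT =====
theorem find_matching_transactions_spec : Claim_equal_find_matching_transactions := by
  intro gA gB ua ub _
  unfold Spec_find_matching_transactions find_matching_transactions find_matching_transactions_alt pvBuildIndex
  exact pvOuterA_eq_findSome? _ _ _ _
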